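-- pv_equiv track=rewrite | github.com/travBrook/P435 | Assignment_1/Mapper/wordCount_map.py | mapChunk
-- ===== SOURCE A (Python) =====
-- import string
--
-- def mapChunk(chunk):
--     pass
--     for char in string.punctuation:
--         chunk = chunk.replace(char, '')
--
--     theWords = chunk.split(" ")
--     words = []
--     for word in theWords:
--         if word != '':
--             words.append((word.upper(), 1))
--
--     return words
-- ===== SOURCE B (Python) =====
-- import string
--
-- def mapChunk(chunk):
--     words = []
--     buf = ''
--     for ch in chunk:
--         if ch == ' ':
--             if buf != '':
--                 words.append((buf.upper(), 1))
--             buf = ''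
--         elif ch in string.punctuation:
--             pass
--         else:
--             buf = buf + ch
--     if buf != '':
--         words.append((buf.upper(), 1))
--     return words
-- ===== Notes on version B (the rewrite author's own statement) =====
-- stated objective: alternative
-- what changed: Replaced the 32 whole-string replace passes followed by split(" ") and a filter loop with one left-to-right character scan that maintains a current-word buffer, flushing it on each space.
import Mathlib
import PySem

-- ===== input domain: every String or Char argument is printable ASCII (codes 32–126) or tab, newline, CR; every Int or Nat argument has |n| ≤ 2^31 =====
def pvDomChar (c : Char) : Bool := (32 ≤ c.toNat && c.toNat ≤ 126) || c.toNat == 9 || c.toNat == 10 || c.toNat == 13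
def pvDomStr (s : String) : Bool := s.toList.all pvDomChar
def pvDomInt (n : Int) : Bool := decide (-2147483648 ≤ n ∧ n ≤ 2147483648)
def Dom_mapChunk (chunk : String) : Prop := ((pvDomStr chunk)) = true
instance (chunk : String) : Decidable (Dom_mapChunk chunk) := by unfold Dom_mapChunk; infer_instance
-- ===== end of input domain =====

-- B replaces A's 32 whole-string replace passes plus split plus filter loop by one
-- left-to-right character scan with a current-word buffer (objective: alternative single-pass decomposition).

-- string.punctuation
def pvPunct : List Char := "!\"#$%&'()*+,-./:;<=>?@[\\]^_`{|}~".toList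

-- ===== PORT A =====
def mapChunk (chunk : String) : List (String × Int) :=
  let chunk' := pvPunct.foldl (fun s c => PySem.Str.replace s (String.singleton c) "") chunk
  let theWords := (PySem.Str.split? chunk' " ").getD []
  theWords.foldl (fun words word =>
    if word ≠ "" then words ++ [(PySem.Str.upper word, (1 : Int))] else words) []

-- ===== PORT B =====
def pvMapLoop : List Char → String → List (String × Int) → List (String × Int)
  | [], buf, words => if buf ≠ "" then words ++ [(PySem.Str.upper buf, (1 : Int))] else words
  | c :: rest, buf, words =>
    if c = ' ' then
      pvMapLoop rest "" (if buf ≠ "" then words ++ [(PySem.Str.upper buf, (1 : Int))] else words)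
    else if pvPunct.contains c then
      pvMapLoop rest buf words
    else
      pvMapLoop rest (buf.push c) words

def mapChunk_alt (chunk : String) : List (String × Int) :=
  pvMapLoop chunk.toList "" []

-- ===== PRECONDITION & SPEC =====
def Spec_mapChunk (chunk : String) (out : List (String × Int)) : Prop := out = mapChunk_alt chunk
instance (chunk : String) (out : List (String × Int)) : Decidable (Spec_mapChunk chunk out) := by unfold Spec_mapChunk; infer_instance

-- ===== CLAIM (what is proved, stated in full; the proofs are below) =====
def Claim_equal_mapChunk : Prop := ∀ (chunk : String), Dom_mapChunk chunk → Spec_mapChunk chunk (mapChunk chunk)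

-- ===== LEMMAS AND PROOFS =====

-- punctuation removed
def pvFilt (l : List Char) : List Char := l.filter (fun c => !pvPunct.contains c)

-- split on the single char ' ', accumulating the current piece in `pre`
def pvSplit (pre : List Char) : List Char → List (List Char)
  | [] => [pre]
  | c :: t => if c = ' ' then pre :: pvSplit [] t else pvSplit (pre ++ [c]) t

-- common normal form of both programs
def pvEmit (l : List Char) : List (String × Int) :=
  ((pvSplit [] l).filter (· ≠ [])).map (fun w => (PySem.Str.upper (String.ofList w), (1 : Int)))

lemma pv_go_split (fuel : Nat) :
    ∀ (l cur : List Char) (accs : List (List Char)), l.length ≤ fuel →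
      PySem.Chars.splitOn.go [' '] fuel l cur accs = accs.reverse ++ pvSplit cur.reverse l := by
  induction fuel with
  | zero =>
    intro l cur accs h
    have : l = [] := List.eq_nil_of_length_eq_zero (Nat.le_zero.mp h)
    subst this
    simp [PySem.Chars.splitOn.go, pvSplit]
  | succ n ih =>
    intro l cur accs h
    cases l with
    | nil => simp [PySem.Chars.splitOn.go, pvSplit]
    | cons c rest =>
      have hrest : rest.length ≤ n := Nat.le_of_succ_le_succ (by simpa using h)
      by_cases hc : c = ' '
      · subst hc
        rw [show PySem.Chars.splitOn.go [' '] (n + 1) (' ' :: rest) cur accs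
              = PySem.Chars.splitOn.go [' '] n rest [] (cur.reverse :: accs) from by
            simp [PySem.Chars.splitOn.go, List.isPrefixOf]]
        rw [ih rest [] (cur.reverse :: accs) hrest]
        simp [pvSplit]
      · rw [show PySem.Chars.splitOn.go [' '] (n + 1) (c :: rest) cur accs
              = PySem.Chars.splitOn.go [' '] n rest (c :: cur) accs from by
            simp only [PySem.Chars.splitOn.go, List.isPrefixOf, Bool.and_true, beq_iff_eq]
            rw [if_neg (fun hh => hc hh.symm)]]
        rw [ih rest (c :: cur) accs hrest]
        simp [pvSplit, hc]

lemma pv_splitOn_space (l : List Char) :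
    PySem.Chars.splitOn l [' '] = pvSplit [] l := by
  unfold PySem.Chars.splitOn
  simpa using pv_go_split (l.length + 1) l [] [] (Nat.le_succ _)

lemma pv_go_replace (c' : Char) (fuel : Nat) :
    ∀ (l acc : List Char), l.length ≤ fuel →
      PySem.Chars.replace.go [c'] [] fuel l acc = acc.reverse ++ l.filter (fun c => !(c == c')) := by
  induction fuel with
  | zero =>
    intro l acc h
    have : l = [] := List.eq_nil_of_length_eq_zero (Nat.le_zero.mp h)
    subst this
    simp [PySem.Chars.replace.go]
  | succ n ih =>
    intro l acc h
    cases l with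
    | nil => simp [PySem.Chars.replace.go]
    | cons c rest =>
      have hrest : rest.length ≤ n := Nat.le_of_succ_le_succ (by simpa using h)
      by_cases hc : c = c'
      · subst hc
        rw [show PySem.Chars.replace.go [c] [] (n + 1) (c :: rest) acc
              = PySem.Chars.replace.go [c] [] n rest acc from by
            simp [PySem.Chars.replace.go, List.isPrefixOf]]
        rw [ih rest acc hrest]
        simp
      · rw [show PySem.Chars.replace.go [c'] [] (n + 1) (c :: rest) acc
              = PySem.Chars.replace.go [c'] [] n rest (c :: acc) from by
            simp only [PySem.Chars.replace.go, List.isPrefixOf, Bool.and_true, beq_iff_eq]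
            rw [if_neg (fun hh => hc hh.symm)]]
        rw [ih rest (c :: acc) hrest]
        simp [hc]

lemma pv_replace_single (l : List Char) (c' : Char) :
    PySem.Chars.replace l [c'] [] = l.filter (fun c => !(c == c')) := by
  unfold PySem.Chars.replace
  simpa using pv_go_replace c' l.length l [] (le_refl _)

lemma pv_foldl_replace_chars (ps : List Char) :
    ∀ (l : List Char),
      ps.foldl (fun s c => PySem.Chars.replace s [c] []) l = l.filter (fun c => !ps.contains c) := by
  induction ps with
  | nil => intro l; simp
  | cons p ps ih =>
    intro l
    simp only [List.foldl_cons]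
    rw [pv_replace_single, ih, List.filter_filter]
    apply List.filter_congr
    intro c _
    by_cases h1 : c = p <;> by_cases h2 : c ∈ ps <;> simp [h1, h2]

lemma pv_foldl_replace_str (ps : List Char) :
    ∀ (s : String),
      (ps.foldl (fun s c => PySem.Str.replace s (String.singleton c) "") s).toList
        = ps.foldl (fun l c => PySem.Chars.replace l [c] []) s.toList := by
  induction ps with
  | nil => intro s; rfl
  | cons p ps ih =>
    intro s
    simp only [List.foldl_cons]
    rw [ih, PySem.Str.toList_replace]
    simp

lemma pv_ofList_toList (s : String) : String.ofList s.toList = s := by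
  apply String.toList_injective
  simp

lemma pv_words_foldl (f : String → String × Int) :
    ∀ (ws : List String) (acc : List (String × Int)),
      ws.foldl (fun words word => if word ≠ "" then words ++ [f word] else words) acc
        = acc ++ (ws.filter (· ≠ "")).map f := by
  intro ws
  induction ws with
  | nil => intro acc; simp
  | cons w ws ih =>
    intro acc
    rw [List.foldl_cons, List.filter_cons]
    by_cases hw : w = ""
    · rw [if_neg (by simp [hw]), if_neg (by simp [hw]), ih]
    · rw [if_pos hw, if_pos (by simpa using hw), ih]
      simp

lemma pv_words_map (ws : List String) :
    (ws.filter (· ≠ "")).map (fun w => (PySem.Str.upper w, (1 : Int)))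
      = ((ws.map String.toList).filter (· ≠ [])).map
          (fun w => (PySem.Str.upper (String.ofList w), (1 : Int))) := by
  induction ws with
  | nil => rfl
  | cons w ws ih =>
    by_cases hw : w = ""
    · subst hw; simpa using ih
    · have hl : w.toList ≠ [] := by
        intro h; exact hw (by simpa [String.toList_eq_nil_iff] using h)
      simp only [List.map_cons, List.filter_cons]
      rw [if_pos (by simpa using hw), if_pos (by simpa using hl)]
      simp only [List.map_cons]
      rw [ih, pv_ofList_toList]

lemma pv_A_eq (chunk : String) : mapChunk chunk = pvEmit (pvFilt chunk.toList) := by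
  unfold mapChunk
  have hchunk :
      (pvPunct.foldl (fun s c => PySem.Str.replace s (String.singleton c) "") chunk).toList
        = pvFilt chunk.toList := by
    rw [pv_foldl_replace_str, pv_foldl_replace_chars]; rfl
  set chunk' := pvPunct.foldl (fun s c => PySem.Str.replace s (String.singleton c) "") chunk with hc'
  have hsplit : Option.map (fun x => List.map String.toList x) (PySem.Str.split? chunk' " ")
      = some (pvSplit [] (pvFilt chunk.toList)) := by
    rw [PySem.Str.split?_map]
    show PySem.Chars.split? chunk'.toList [' '] = _
    rw [hchunk]
    simp [PySem.Chars.split?, pv_splitOn_space]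
  cases hws : PySem.Str.split? chunk' " " with
  | none => rw [hws] at hsplit; simp at hsplit
  | some ws =>
    rw [hws] at hsplit
    simp only [Option.map_some, Option.some.injEq] at hsplit
    simp only [hws, Option.getD_some]
    rw [pv_words_foldl (fun w => (PySem.Str.upper w, (1 : Int))) ws []]
    rw [pv_words_map ws, hsplit]
    rfl

lemma pv_split_no_space (l : List Char) (h : ' ' ∉ l) :
    ∀ pre, pvSplit pre l = [pre ++ l] := by
  induction l with
  | nil => intro pre; simp [pvSplit]
  | cons c t ih =>
    intro pre
    have hc : c ≠ ' ' := fun hh => h (hh ▸ List.mem_cons_self)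
    rw [pvSplit, if_neg hc, ih (fun hh => h (List.mem_cons_of_mem _ hh))]
    simp

lemma pv_split_append (b : List Char) (hb : ' ' ∉ b) (t : List Char) :
    ∀ pre, pvSplit pre (b ++ ' ' :: t) = (pre ++ b) :: pvSplit [] t := by
  induction b with
  | nil => intro pre; simp [pvSplit]
  | cons c b ih =>
    intro pre
    have hc : c ≠ ' ' := fun hh => hb (hh ▸ List.mem_cons_self)
    rw [List.cons_append, pvSplit, if_neg hc, ih (fun hh => hb (List.mem_cons_of_mem _ hh))]
    simp

lemma pv_emit_nospace (b : List Char) (hb : ' ' ∉ b) :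
    pvEmit b = if b ≠ [] then [(PySem.Str.upper (String.ofList b), (1 : Int))] else [] := by
  unfold pvEmit
  rw [show pvSplit [] b = [[] ++ b] from pv_split_no_space b hb []]
  by_cases hbe : b = []
  · subst hbe; rfl
  · simp [hbe]

lemma pv_emit_flush (b : List Char) (hb : ' ' ∉ b) (t : List Char) :
    pvEmit (b ++ ' ' :: t)
      = (if b ≠ [] then [(PySem.Str.upper (String.ofList b), (1 : Int))] else []) ++ pvEmit t := by
  unfold pvEmit
  rw [show pvSplit [] (b ++ ' ' :: t) = ([] ++ b) :: pvSplit [] t from pv_split_append b hb t []]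
  by_cases hbe : b = []
  · subst hbe; simp
  · simp [hbe]

lemma pv_loop_filt : ∀ (l : List Char) (buf : String) (words : List (String × Int)),
    pvMapLoop l buf words = pvMapLoop (pvFilt l) buf words := by
  intro l
  induction l with
  | nil => intro buf words; rfl
  | cons c t ih =>
    intro buf words
    by_cases hc : c = ' '
    · subst hc
      have : pvFilt (' ' :: t) = ' ' :: pvFilt t := by
        simp [pvFilt, show (' ' ∈ pvPunct) = False by simp [pvPunct]]
      rw [this, pvMapLoop, pvMapLoop, if_pos rfl, if_pos rfl, ih]
    · by_cases hp : pvPunct.contains c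
      · have hm : c ∈ pvPunct := by simpa using hp
        have : pvFilt (c :: t) = pvFilt t := by simp [pvFilt, hm]
        rw [this, pvMapLoop, if_neg hc, if_pos hp, ih]
      · have hm : c ∉ pvPunct := by simpa using hp
        have : pvFilt (c :: t) = c :: pvFilt t := by simp [pvFilt, hm]
        rw [this, pvMapLoop, pvMapLoop, if_neg hc, if_neg hc, if_neg hp, if_neg hp, ih]

lemma pv_loop_emit : ∀ (l : List Char) (buf : String) (words : List (String × Int)),
    ' ' ∉ buf.toList → (∀ c ∈ l, ¬ pvPunct.contains c) →
    pvMapLoop l buf words = words ++ pvEmit (buf.toList ++ l) := by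
  intro l
  induction l with
  | nil =>
    intro buf words hbuf _
    rw [pvMapLoop, List.append_nil, pv_emit_nospace buf.toList hbuf]
    by_cases hb : buf = ""
    · subst hb; simp
    · have hl : buf.toList ≠ [] := by
        intro h; exact hb (by simpa [String.toList_eq_nil_iff] using h)
      rw [if_pos hb, if_pos hl, pv_ofList_toList]
  | cons c t ih =>
    intro buf words hbuf hl
    by_cases hc : c = ' '
    · subst hc
      rw [pvMapLoop, if_pos rfl]
      rw [ih "" _ (by simp) (fun c hc => hl c (List.mem_cons_of_mem _ hc))]
      rw [pv_emit_flush buf.toList hbuf t]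
      by_cases hb : buf = ""
      · subst hb; simp
      · have hlb : buf.toList ≠ [] := by
          intro h; exact hb (by simpa [String.toList_eq_nil_iff] using h)
        rw [if_pos hb, if_pos hlb, pv_ofList_toList]
        simp
    · have hp : ¬ pvPunct.contains c := hl c List.mem_cons_self
      rw [pvMapLoop, if_neg hc, if_neg hp]
      rw [ih (buf.push c) words
        (by rw [String.toList_push]; intro h
            rcases List.mem_append.mp h with h | h
            · exact hbuf h
            · simp at h; exact hc h.symm)
        (fun c hc => hl c (List.mem_cons_of_mem _ hc))]
      rw [String.toList_push]
      simp

lemma pv_B_eq (chunk : String) : mapChunk_alt chunk = pvEmit (pvFilt chunk.toList) := by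
  unfold mapChunk_alt
  rw [pv_loop_filt]
  rw [pv_loop_emit (pvFilt chunk.toList) "" [] (by simp)
    (by intro c hc; simp [pvFilt, List.mem_filter] at hc; simp [hc.2])]
  rfl

-- ===== VERDICT (by name: the statement is the Claim_ definition above) =====
theorem mapChunk_spec : Claim_equal_mapChunk := by
  intro chunk _
  show mapChunk chunk = mapChunk_alt chunk
  rw [pv_A_eq, pv_B_eq]
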